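-- pv_equiv track=rewrite | github.com/michael-yrao/cse-review | dataStructureAlgorithm/leetcode/2022_leetcode/python/1498_SubsequenceLessOrEqualSum.py | numSubseqEfficient
-- ===== SOURCE A (Python) =====
-- from typing import List
--
-- def numSubseqEfficient(nums: List[int], target: int) -> int:
--     result = 0
--     nums.sort()
--     mod = (10**9 + 7)
--
--     l,r=0,len(nums)-1
--
--     # We do inclusive here since we can use same value as min and max
--     while l <= r:
--         # If we found a valid l and r combination
--         # Add to result and increment left
--         if nums[l] + nums[r] <= target:
--             result += pow(2,r-l,mod)
--             l+=1
--         # Otherwise, keep moving right until we do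
--         else:
--             r-=1
--
--     return result%mod
-- ===== SOURCE B (Python) =====
-- from typing import List
--
-- def _upper(a, x):
--     # index of the first element of sorted list a that is strictly greater than x
--     lo, hi = 0, len(a)
--     while lo < hi:
--         mid = (lo + hi) // 2
--         if a[mid] <= x:
--             lo = mid + 1
--         else:
--             hi = mid
--     return lo
--
-- def numSubseqEfficient(nums: List[int], target: int) -> int:
--     nums.sort()
--     mod = 10 ** 9 + 7
--     result = 0
--     for i in range(len(nums)):
--         j = _upper(nums, target - nums[i]) - 1
--         if j >= i:
--             result += pow(2, j - i, mod)
--     return result % mod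
-- ===== Notes on version B (the rewrite author's own statement) =====
-- stated objective: alternative
-- what changed: Replaces A's converging two-pointer sweep with a single forward pass that, for each minimum index i, locates the largest usable maximum index via a hand-written upper-bound binary search (bisect_right equivalent) and adds pow(2, j-i, mod) when j >= i.
import Mathlib
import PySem

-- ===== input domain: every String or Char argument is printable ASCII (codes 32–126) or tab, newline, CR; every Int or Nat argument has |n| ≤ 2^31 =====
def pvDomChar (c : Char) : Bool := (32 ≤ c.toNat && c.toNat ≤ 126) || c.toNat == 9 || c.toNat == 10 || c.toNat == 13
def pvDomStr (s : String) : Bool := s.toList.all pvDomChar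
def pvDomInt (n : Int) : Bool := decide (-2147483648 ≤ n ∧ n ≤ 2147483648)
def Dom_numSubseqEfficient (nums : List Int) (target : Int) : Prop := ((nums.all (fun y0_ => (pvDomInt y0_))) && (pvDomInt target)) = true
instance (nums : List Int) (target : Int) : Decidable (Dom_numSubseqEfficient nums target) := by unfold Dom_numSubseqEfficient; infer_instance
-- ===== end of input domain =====

-- B replaces A's converging two-pointer sweep by one forward pass that, for each minimum index i,
-- finds the largest usable maximum index by a hand-written upper-bound binary search (objective:
-- alternative algorithm, same O(n log n) cost). Both Pythons sort `nums` in place; the equivalence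
-- proved here is about the RETURN value.

-- ===== PORT A =====
-- the two-pointer while loop; indexing uses pyGet?/getD 0 (l and r are always in range when read,
-- since the loop only reads nums[l], nums[r] under 0 ≤ l ≤ r < len)
def numSubseqLoopA (s : List Int) (target : Int) (l r result : Int) : Int :=
  if l ≤ r then
    if (PySem.List.pyGet? s l).getD 0 + (PySem.List.pyGet? s r).getD 0 ≤ target then
      numSubseqLoopA s target (l + 1) r (result + PySem.Int.powMod 2 (r - l).toNat 1000000007)
    else
      numSubseqLoopA s target l (r - 1) result
  else result
termination_by (r + 1 - l).toNat
decreasing_by all_goals omega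

def numSubseqEfficient (nums : List Int) (target : Int) : Int :=
  let s := PySem.List.sorted nums (fun x => x)
  PySem.Int.mod (numSubseqLoopA s target 0 ((s.length : Int) - 1) 0) 1000000007

-- ===== PORT B =====
-- Source B's hand-written `_upper` (first index whose element is > x), ported step for step
def upperLoop (a : List Int) (x : Int) (lo hi : Nat) : Nat :=
  if lo < hi then
    let mid := (lo + hi) / 2
    if (PySem.List.pyGet? a (mid : Int)).getD 0 ≤ x then upperLoop a x (mid + 1) hi
    else upperLoop a x lo mid
  else lo
termination_by hi - lo
decreasing_by all_goals omega

def numSubseqEfficient_alt (nums : List Int) (target : Int) : Int :=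
  let s := PySem.List.sorted nums (fun x => x)
  let n := s.length
  PySem.Int.mod
    ((List.range n).foldl
      (fun (result : Int) (i : Nat) =>
        let j : Int := (upperLoop s (target - (PySem.List.pyGet? s (i : Int)).getD 0) 0 n : Int) - 1
        if (i : Int) ≤ j then result + PySem.Int.powMod 2 (j - i).toNat 1000000007 else result)
      0)
    1000000007

-- ===== PRECONDITION & SPEC =====
def Spec_numSubseqEfficient (nums : List Int) (target : Int) (out : Int) : Prop := out = numSubseqEfficient_alt nums target
instance (nums : List Int) (target : Int) (out : Int) : Decidable (Spec_numSubseqEfficient nums target out) := by unfold Spec_numSubseqEfficient; infer_instance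

-- ===== CLAIM (what is proved, stated in full; the proofs are below) =====
def Claim_equal_numSubseqEfficient : Prop := ∀ (nums : List Int) (target : Int), Dom_numSubseqEfficient nums target → Spec_numSubseqEfficient nums target (numSubseqEfficient nums target)

-- ===== LEMMAS AND PROOFS =====

-- the largest candidate maximum index for minimum index i, as B computes it (upper bound - 1)
def pvJ (s : List Int) (target : Int) (i : Nat) : Int :=
  (upperLoop s (target - (PySem.List.pyGet? s (i : Int)).getD 0) 0 s.length : Int) - 1

-- the per-minimum term both programs accumulate
def pvTerm (s : List Int) (target : Int) (i : Nat) : Int :=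
  if (i : Int) ≤ pvJ s target i then PySem.Int.powMod 2 (pvJ s target i - i).toNat 1000000007 else 0

theorem pyGetD_eq_getD (s : List Int) (k : Nat) :
    (PySem.List.pyGet? s (k : Int)).getD 0 = s.getD k 0 := by
  rw [PySem.List.pyGet?_natCast, List.getD_eq_getElem?_getD]

-- B's fold is the running sum of pvTerm
theorem foldlB_eq_sum (s : List Int) (target : Int) :
    ∀ (l : List Nat) (acc : Int),
      l.foldl
        (fun (result : Int) (i : Nat) =>
          let j : Int := (upperLoop s (target - (PySem.List.pyGet? s (i : Int)).getD 0) 0 s.length : Int) - 1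
          if (i : Int) ≤ j then result + PySem.Int.powMod 2 (j - i).toNat 1000000007 else result)
        acc
      = acc + (l.map (pvTerm s target)).sum := by
  intro l
  induction l with
  | nil => simp
  | cons i l ih =>
    intro acc
    rw [List.foldl_cons, List.map_cons, List.sum_cons, ih]
    show (if (i : Int) ≤ pvJ s target i then
            acc + PySem.Int.powMod 2 (pvJ s target i - i).toNat 1000000007 else acc) + _ = _
    by_cases h : (i : Int) ≤ pvJ s target i
    · rw [if_pos h]; unfold pvTerm; rw [if_pos h]; ring
    · rw [if_neg h]; unfold pvTerm; rw [if_neg h]; ring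

theorem upperLoop_le_aux (a : List Int) (x : Int) :
    ∀ (d lo hi : Nat), hi - lo ≤ d → lo ≤ hi → upperLoop a x lo hi ≤ hi := by
  intro d
  induction d with
  | zero =>
    intro lo hi hd hle
    unfold upperLoop
    have h : ¬ lo < hi := by omega
    simp [h]; omega
  | succ d ih =>
    intro lo hi hd hle
    unfold upperLoop
    by_cases h : lo < hi
    · simp only [if_pos h]
      by_cases hc : (PySem.List.pyGet? a (((lo + hi) / 2 : Nat) : Int)).getD 0 ≤ x
      · simp only [hc, if_pos]
        exact ih _ _ (by omega) (by omega)
      · simp only [hc, if_false]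
        exact le_trans (ih _ _ (by omega) (by omega)) (by omega)
    · simp only [if_neg h]
      exact hle

-- invariant-based characterisation of the hand-written binary search on a ≤-sorted list
theorem upperLoop_inv (s : List Int)
    (hmono : ∀ p q : Nat, p ≤ q → q < s.length → s.getD p 0 ≤ s.getD q 0) (x : Int) :
    ∀ (d lo hi : Nat), hi - lo ≤ d → lo ≤ hi → hi ≤ s.length →
      (∀ k, k < lo → s.getD k 0 ≤ x) →
      (∀ k, hi ≤ k → k < s.length → ¬ s.getD k 0 ≤ x) →
      ∀ k, k < s.length → (s.getD k 0 ≤ x ↔ k < upperLoop s x lo hi) := by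
  intro d
  induction d with
  | zero =>
    intro lo hi hd hle hhi hpre hsuf k hk
    unfold upperLoop
    have h : ¬ lo < hi := by omega
    simp only [if_neg h]
    constructor
    · intro hx
      by_contra hklo
      exact hsuf k (by omega) hk hx
    · intro hklo; exact hpre k hklo
  | succ d ih =>
    intro lo hi hd hle hhi hpre hsuf k hk
    unfold upperLoop
    by_cases h : lo < hi
    · simp only [if_pos h]
      have hmidlen : (lo + hi) / 2 < s.length := by omega
      have hget : (PySem.List.pyGet? s (((lo + hi) / 2 : Nat) : Int)).getD 0 = s.getD ((lo + hi) / 2) 0 :=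
        pyGetD_eq_getD s _
      by_cases hc : s.getD ((lo + hi) / 2) 0 ≤ x
      · rw [hget, if_pos hc]
        refine ih ((lo + hi) / 2 + 1) hi (by omega) (by omega) hhi ?_ hsuf k hk
        intro k' hk'
        exact le_trans (hmono k' ((lo + hi) / 2) (by omega) hmidlen) hc
      · rw [hget, if_neg hc]
        refine ih lo ((lo + hi) / 2) (by omega) (by omega) (by omega) hpre ?_ k hk
        intro k' hk1 hk2 hx
        exact hc (le_trans (hmono ((lo + hi) / 2) k' hk1 hk2) hx)
    · simp only [if_neg h]
      constructor
      · intro hx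
        by_contra hklo
        exact hsuf k (by omega) hk hx
      · intro hklo; exact hpre k hklo

theorem upperLoop_char (s : List Int)
    (hmono : ∀ p q : Nat, p ≤ q → q < s.length → s.getD p 0 ≤ s.getD q 0) (x : Int) :
    ∀ k, k < s.length → (s.getD k 0 ≤ x ↔ k < upperLoop s x 0 s.length) :=
  upperLoop_inv s hmono x s.length 0 s.length (by omega) (by omega) (by omega)
    (fun k hk => absurd hk (by omega)) (fun k h1 h2 => absurd h2 (by omega))

-- a term is zero as soon as no usable maximum index remains at or above i
theorem pvTerm_eq_zero (s : List Int) (target : Int)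
    (hmono : ∀ p q : Nat, p ≤ q → q < s.length → s.getD p 0 ≤ s.getD q 0)
    (i : Nat) (_hilen : i < s.length)
    (hno : ∀ j : Nat, i ≤ j → j < s.length → target < s.getD i 0 + s.getD j 0) :
    pvTerm s target i = 0 := by
  unfold pvTerm
  rw [if_neg]
  intro hij
  unfold pvJ at hij
  rw [pyGetD_eq_getD] at hij
  set U := upperLoop s (target - s.getD i 0) 0 s.length with hU
  have hUle : U ≤ s.length := upperLoop_le_aux s _ s.length 0 s.length (by omega) (by omega)
  have hUpos : i + 1 ≤ U := by omega
  have hj0 : U - 1 < s.length := by omega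
  have := (upperLoop_char s hmono (target - s.getD i 0) (U - 1) hj0).mpr (by omega)
  have h2 := hno (U - 1) (by omega) hj0
  omega

-- the two-pointer loop computes the tail sum of pvTerm, under the two-pointer invariant
theorem loopA_eq (s : List Int) (target : Int)
    (hmono : ∀ p q : Nat, p ≤ q → q < s.length → s.getD p 0 ≤ s.getD q 0) :
    ∀ (d : Nat) (l r acc : Int), (r + 1 - l).toNat ≤ d → 0 ≤ l → r ≤ (s.length : Int) - 1 →
      (∀ (k j : Nat), k < s.length → j < s.length → l ≤ (k : Int) → r < (j : Int) →
        target < s.getD k 0 + s.getD j 0) →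
      numSubseqLoopA s target l r acc
        = acc + ∑ i ∈ Finset.Ico l.toNat s.length, pvTerm s target i := by
  intro d
  induction d with
  | zero =>
    intro l r acc hd hl hr hinv
    unfold numSubseqLoopA
    have h : ¬ l ≤ r := by omega
    rw [if_neg h, Finset.sum_eq_zero, add_zero]
    intro i hi
    rw [Finset.mem_Ico] at hi
    refine pvTerm_eq_zero s target hmono i hi.2 (fun j hij hjlen => ?_)
    exact hinv i j hi.2 hjlen (by omega) (by omega)
  | succ d ih =>
    intro l r acc hd hl hr hinv
    unfold numSubseqLoopA
    by_cases h : l ≤ r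
    · rw [if_pos h]
      have hrn : r.toNat < s.length := by omega
      have hln : l.toNat < s.length := by omega
      have hgl : (PySem.List.pyGet? s l).getD 0 = s.getD l.toNat 0 := by
        rw [PySem.List.pyGet?_of_nonneg (xs := s) hl, List.getD_eq_getElem?_getD]
      have hgr : (PySem.List.pyGet? s r).getD 0 = s.getD r.toNat 0 := by
        rw [PySem.List.pyGet?_of_nonneg (xs := s) (by omega), List.getD_eq_getElem?_getD]
      rw [hgl, hgr]
      by_cases hc : s.getD l.toNat 0 + s.getD r.toNat 0 ≤ target
      · rw [if_pos hc]
        rw [ih (l + 1) r _ (by omega) (by omega) hr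
              (fun k j hk hj hlk hrj => hinv k j hk hj (by omega) hrj)]
        rw [Finset.sum_eq_sum_Ico_succ_bot (by omega : l.toNat < s.length) (pvTerm s target)]
        have hterm : pvTerm s target l.toNat = PySem.Int.powMod 2 (r - l).toNat 1000000007 := by
          have hJ : pvJ s target l.toNat = r := by
            unfold pvJ
            rw [pyGetD_eq_getD]
            set U := upperLoop s (target - s.getD l.toNat 0) 0 s.length with hU
            have hUle : U ≤ s.length := upperLoop_le_aux s _ s.length 0 s.length (by omega) (by omega)
            have h1 : r.toNat < U :=
              (upperLoop_char s hmono (target - s.getD l.toNat 0) r.toNat hrn).mp (by omega)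
            have h2 : U ≤ r.toNat + 1 := by
              by_contra hgt
              have hlt : r.toNat + 1 < s.length := by omega
              have := (upperLoop_char s hmono (target - s.getD l.toNat 0) (r.toNat + 1) hlt).mpr (by omega)
              have := hinv l.toNat (r.toNat + 1) hln hlt (by omega) (by omega)
              omega
            omega
          unfold pvTerm
          rw [hJ, if_pos (by omega)]
          congr 1
          omega
        rw [hterm]
        have hl1 : (l + 1).toNat = l.toNat + 1 := by omega
        rw [hl1]
        ring
      · rw [if_neg hc]
        refine ih l (r - 1) acc (by omega) hl (by omega) ?_
        intro k j hk hj hlk hrj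
        by_cases hjr : r < (j : Int)
        · exact hinv k j hk hj hlk hjr
        · have hjeq : j = r.toNat := by omega
          subst hjeq
          have := hmono l.toNat k (by omega) hk
          omega
    · rw [if_neg h, Finset.sum_eq_zero, add_zero]
      intro i hi
      rw [Finset.mem_Ico] at hi
      refine pvTerm_eq_zero s target hmono i hi.2 (fun j hij hjlen => ?_)
      exact hinv i j hi.2 hjlen (by omega) (by omega)

-- ===== VERDICT (by name: the statement is the Claim_ definition above) =====
theorem numSubseqEfficient_spec : Claim_equal_numSubseqEfficient := by
  intro nums target _
  unfold Spec_numSubseqEfficient numSubseqEfficient numSubseqEfficient_alt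
  have hmono : ∀ p q : Nat, p ≤ q → q < (PySem.List.sorted nums (fun x => x)).length →
      (PySem.List.sorted nums (fun x => x)).getD p 0 ≤ (PySem.List.sorted nums (fun x => x)).getD q 0 := by
    intro p q hpq hq
    rw [List.getD_eq_getElem _ _ (by omega), List.getD_eq_getElem _ _ hq]
    exact PySem.List.key_sorted_getElem_mono nums (fun x => x) hpq hq
  set s := PySem.List.sorted nums (fun x => x) with hs
  simp only []
  rw [loopA_eq s target hmono ((s.length : Int) - 1 + 1 - 0).toNat 0 ((s.length : Int) - 1) 0
        (by omega) (by omega) (by omega)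
        (fun k j hk hj hlk hrj => absurd hrj (by omega))]
  rw [foldlB_eq_sum s target (List.range s.length) 0]
  congr 1
  have h0 : (Int.toNat 0) = 0 := rfl
  rw [h0, ← Finset.range_eq_Ico]
  rfl
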